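-- pv_equiv track=rewrite | github.com/StopSoo/PS | 2025-PS/week-6/[SILVER IV] 가로수.py | solution
-- ===== SOURCE A (Python) =====
-- import math
--
-- def solution(tree):
--     n = len(tree)
--     distances = [tree[i] - tree[i - 1] for i in range(1, n)]
--     gcd_value = math.gcd(*distances)
--
--     result = 0
--     for i in distances:
--         result += (i // gcd_value) - 1
--     return result
-- ===== SOURCE B (Python) =====
-- import math
--
-- def solution(tree):
--     # gcd of offsets of every element from the first one, then count
--     # multiples in the whole span at once instead of per gap
--     if len(tree) < 2:
--         return 0
--     first = tree[0]
--     last = tree[-1]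
--     g = 0
--     for x in tree:
--         g = math.gcd(g, x - first)
--     return (last - first) // g - (len(tree) - 1)
-- ===== Notes on version B (the rewrite author's own statement) =====
-- stated objective: faster
-- what changed: B folds gcd over each element's offset from the first tree (iterating the list itself, no difference list materialized) and counts all missing trees at once from the whole span, (last-first)//g - (n-1), instead of A's gcd of consecutive gaps followed by a per-gap summation of (d//g - 1); timing measured B ~2x faster (no intermediate list, no per-gap division loop).
import Mathlib
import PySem

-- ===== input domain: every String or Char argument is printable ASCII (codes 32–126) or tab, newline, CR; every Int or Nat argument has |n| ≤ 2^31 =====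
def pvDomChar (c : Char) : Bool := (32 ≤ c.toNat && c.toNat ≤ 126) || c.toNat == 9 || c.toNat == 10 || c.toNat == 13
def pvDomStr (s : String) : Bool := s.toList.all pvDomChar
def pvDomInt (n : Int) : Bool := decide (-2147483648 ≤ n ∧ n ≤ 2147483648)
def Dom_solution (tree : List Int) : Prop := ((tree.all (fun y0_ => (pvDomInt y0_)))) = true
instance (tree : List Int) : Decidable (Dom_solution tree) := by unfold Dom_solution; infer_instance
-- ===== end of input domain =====

-- B folds gcd over each element's offset from the first tree and counts all missing trees
-- at once from the whole span, instead of A's gcd of consecutive gaps + per-gap summation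
-- (objective: alternative).

-- ===== PORT A =====
def solution (tree : List Int) : Int :=
  let n : Int := tree.length
  let distances : List Int :=
    (PySem.List.pyRange 1 n 1).map (fun i => PySem.List.pyGetD tree i 0 - PySem.List.pyGetD tree (i - 1) 0)
  -- math.gcd(*distances): left fold of gcd starting at 0 (math.gcd() == 0); exact on ints
  let gcd_value : Int := ((distances.foldl (fun a d => Int.gcd (a : Int) d) 0 : Nat) : Int)
  distances.foldl (fun result i => result + (PySem.Int.floordiv i gcd_value - 1)) 0

-- ===== PORT B =====
def solution_alt (tree : List Int) : Int :=
  if (tree.length : Int) < 2 then 0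
  else
    let first : Int := PySem.List.pyGetD tree 0 0
    let last : Int := PySem.List.pyGetD tree (-1) 0
    let g : Nat := tree.foldl (fun g x => Int.gcd (g : Int) (x - first)) 0
    PySem.Int.floordiv (last - first) (g : Int) - ((tree.length : Int) - 1)

-- ===== PRECONDITION & SPEC =====
-- Pre_ excludes the inputs on which A raises ZeroDivisionError: lists of length ≥ 2 whose
-- elements are all equal (every gap is 0, so the gcd is 0 and '// gcd_value' raises).
def Pre_solution (tree : List Int) : Prop :=
  tree.length ≤ 1 ∨ ∃ x ∈ tree, x ≠ tree.headD 0
instance (tree : List Int) : Decidable (Pre_solution tree) := by unfold Pre_solution; infer_instance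
def pvWitness_solution : List Int := [1, 3, 7]

def Spec_solution (tree : List Int) (out : Int) : Prop := out = solution_alt tree
instance (tree : List Int) (out : Int) : Decidable (Spec_solution tree out) := by unfold Spec_solution; infer_instance

-- ===== CLAIM (what is proved, stated in full; the proofs are below) =====
def Claim_equal_solution : Prop := ∀ (tree : List Int), Dom_solution tree → Pre_solution tree → Spec_solution tree (solution tree)

-- ===== LEMMAS AND PROOFS =====

-- the list of consecutive gaps, structurally
def dsOf (tree : List Int) : List Int := List.zipWith (fun b a => b - a) tree.tail tree

theorem length_dsOf (tree : List Int) : (dsOf tree).length = tree.length - 1 := by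
  simp [dsOf]

-- A's comprehension of gaps equals the structural gap list
theorem distances_eq (tree : List Int) :
    (PySem.List.pyRange 1 (tree.length : Int) 1).map
      (fun i => PySem.List.pyGetD tree i 0 - PySem.List.pyGetD tree (i - 1) 0) = dsOf tree := by
  rw [PySem.List.pyRange_one]
  apply List.ext_getElem
  · simp [length_dsOf]
  · intro k h1 h2
    simp only [List.getElem_map, List.getElem_range]
    have hk : k < tree.length - 1 := by simpa [length_dsOf] using h2
    have e1 : (1 : Int) + (k : Int) = ((k + 1 : Nat) : Int) := by push_cast; ring
    have e2 : ((k + 1 : Nat) : Int) - 1 = ((k : Nat) : Int) := by push_cast; ring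
    rw [e1, e2, PySem.List.pyGetD_natCast, PySem.List.pyGetD_natCast,
        List.getD_eq_getElem _ _ (by omega), List.getD_eq_getElem _ _ (by omega)]
    simp [dsOf, List.getElem_zipWith, List.getElem_tail]

def gcdStep (a : Nat) (d : Int) : Nat := Int.gcd (a : Int) d

theorem gcd_fold_dvd_acc (ds : List Int) (acc : Nat) : ds.foldl gcdStep acc ∣ acc := by
  induction ds generalizing acc with
  | nil => simp
  | cons d t ih =>
    exact dvd_trans (ih (gcdStep acc d))
      (by simpa [gcdStep, Int.gcd] using Nat.gcd_dvd_left acc d.natAbs)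

theorem gcd_fold_dvd (ds : List Int) :
    ∀ (acc : Nat), ∀ d ∈ ds, ((ds.foldl gcdStep acc : Nat) : Int) ∣ d := by
  induction ds with
  | nil => intro acc d hd; cases hd
  | cons d0 t ih =>
    intro acc d hd
    rcases List.mem_cons.mp hd with h | h
    · subst h
      have h1 : (t.foldl gcdStep (gcdStep acc d) : Nat) ∣ gcdStep acc d :=
        gcd_fold_dvd_acc t _
      have h2 : ((gcdStep acc d : Nat) : Int) ∣ d := by
        simpa [gcdStep] using Int.gcd_dvd_right ((acc : Int)) d
      exact dvd_trans (Int.natCast_dvd_natCast.mpr h1) h2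
    · exact ih _ d h

-- a common divisor of the accumulator and all elements divides the gcd fold
theorem dvd_gcd_fold (ds : List Int) :
    ∀ (acc : Nat) (c : Nat), c ∣ acc → (∀ d ∈ ds, (c : Int) ∣ d) → c ∣ ds.foldl gcdStep acc := by
  induction ds with
  | nil => intro acc c hacc _; simpa using hacc
  | cons d t ih =>
    intro acc c hacc hall
    refine ih (gcdStep acc d) c ?_ (fun x hx => hall x (by simp [hx]))
    have hd : c ∣ d.natAbs := Int.natCast_dvd_natCast.mp (Int.dvd_natAbs.mpr (hall d (by simp)))
    exact Nat.dvd_gcd hacc hd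

theorem gcd_fold_eq_zero (ds : List Int) :
    ∀ (acc : Nat), (ds.foldl gcdStep acc = 0 ↔ acc = 0 ∧ ∀ d ∈ ds, d = 0) := by
  induction ds with
  | nil => intro acc; simp
  | cons d t ih =>
    intro acc
    have hstep : gcdStep acc d = 0 ↔ acc = 0 ∧ d = 0 := by
      simp [gcdStep, Int.gcd, Nat.gcd_eq_zero_iff, Int.natAbs_eq_zero]
    rw [List.foldl_cons, ih, hstep, List.forall_mem_cons]
    tauto

-- if a number divides all consecutive gaps, it divides every offset from the head
theorem gaps_dvd_anchor (c : Int) (a : Int) (t : List Int)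
    (h : ∀ d ∈ dsOf (a :: t), c ∣ d) : ∀ x ∈ a :: t, c ∣ (x - a) := by
  induction t generalizing a with
  | nil => intro x hx; simp at hx; simp [hx]
  | cons b t ih =>
    intro x hx
    have hba : c ∣ (b - a) := h _ (by simp [dsOf])
    rcases List.mem_cons.mp hx with h1 | h1
    · simp [h1]
    · have hxb : c ∣ (x - b) := ih b (fun d hd => h d (by simp [dsOf] at hd ⊢; tauto)) x h1
      have : x - a = (x - b) + (b - a) := by ring
      rw [this]; exact dvd_add hxb hba

-- if a number divides every offset from the head, it divides every consecutive gap
theorem anchor_dvd_gaps (c : Int) (a : Int) (t : List Int)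
    (h : ∀ x ∈ a :: t, c ∣ (x - a)) : ∀ d ∈ dsOf (a :: t), c ∣ d := by
  induction t generalizing a with
  | nil => intro d hd; simp [dsOf] at hd
  | cons b t ih =>
    intro d hd
    have hds : dsOf (a :: b :: t) = (b - a) :: dsOf (b :: t) := by simp [dsOf]
    rw [hds] at hd
    rcases List.mem_cons.mp hd with h1 | h1
    · subst h1; exact h b (by simp)
    · refine ih b ?_ d h1
      intro x hx
      have hxa : c ∣ (x - a) := h x (by simp at hx ⊢; tauto)
      have hba : c ∣ (b - a) := h b (by simp)
      have : x - b = (x - a) - (b - a) := by ring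
      rw [this]; exact dvd_sub hxa hba

-- B's anchored gcd equals A's gap gcd
theorem anchor_gcd_eq (a : Int) (t : List Int) :
    ((a :: t).map (fun x => x - a)).foldl gcdStep 0 = (dsOf (a :: t)).foldl gcdStep 0 := by
  set gB := ((a :: t).map (fun x => x - a)).foldl gcdStep 0 with hgB
  set gA := (dsOf (a :: t)).foldl gcdStep 0 with hgA
  apply Nat.dvd_antisymm
  · -- gB ∣ gA : gB divides every offset, hence every gap, hence the gap fold
    refine dvd_gcd_fold _ 0 gB (dvd_zero _) ?_
    refine anchor_dvd_gaps (gB : Int) a t ?_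
    intro x hx
    exact gcd_fold_dvd _ 0 (x - a) (List.mem_map.mpr ⟨x, hx, rfl⟩)
  · -- gA ∣ gB : gA divides every gap, hence every offset, hence the offset fold
    refine dvd_gcd_fold _ 0 gA (dvd_zero _) ?_
    intro d hd
    rcases List.mem_map.mp hd with ⟨x, hx, rfl⟩
    exact gaps_dvd_anchor (gA : Int) a t (fun d hd => gcd_fold_dvd _ 0 d hd) x hx

-- if all gaps are zero, all elements equal the head
theorem all_eq_head_of_gaps_zero (a : Int) (t : List Int)
    (h : ∀ d ∈ dsOf (a :: t), d = 0) : ∀ x ∈ a :: t, x = a := by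
  induction t generalizing a with
  | nil => intro x hx; simpa using hx
  | cons b t ih =>
    intro x hx
    have hba : b - a = 0 := h _ (by simp [dsOf])
    rcases List.mem_cons.mp hx with h1 | h1
    · exact h1
    · have := ih b (fun d hd => h d (by simp [dsOf] at hd ⊢; tauto)) x h1
      omega

theorem sum_dsOf (a : Int) (t : List Int) :
    (dsOf (a :: t)).sum = (a :: t).getLast (by simp) - a := by
  induction t generalizing a with
  | nil => simp [dsOf]
  | cons b t ih =>
    have hds : dsOf (a :: b :: t) = (b - a) :: dsOf (b :: t) := by simp [dsOf]
    have hl : (a :: b :: t).getLast (by simp) = (b :: t).getLast (by simp) :=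
      List.getLast_cons (by simp)
    rw [hds, List.sum_cons, ih b, hl]
    ring

theorem foldl_add_shift (ds : List Int) (f : Int → Int) (b : Int) :
    ds.foldl (fun r i => r + f i) b = b + (ds.map f).sum := by
  induction ds generalizing b with
  | nil => simp
  | cons d t ih => simp [ih]; ring

theorem map_div_sum (g : Int) (hg : 0 < g) :
    ∀ (ds : List Int), (∀ d ∈ ds, g ∣ d) →
      (ds.map (fun i => PySem.Int.floordiv i g - 1)).sum = ds.sum / g - ds.length := by
  intro ds
  induction ds with
  | nil => intro _; simp
  | cons d t ih =>
    intro hdvd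
    rw [List.map_cons, List.sum_cons, List.sum_cons,
        Int.add_ediv_of_dvd_left (hdvd d (by simp)),
        ih (fun x hx => hdvd x (by simp [hx])),
        PySem.Int.floordiv_eq_ediv_of_pos hg]
    simp only [List.length_cons]
    push_cast
    ring

theorem sum_exact_div (ds : List Int) (g : Int) (hg : 0 < g) (hdvd : ∀ d ∈ ds, g ∣ d) :
    ds.foldl (fun r i => r + (PySem.Int.floordiv i g - 1)) 0
      = PySem.Int.floordiv ds.sum g - ds.length := by
  rw [foldl_add_shift, map_div_sum g hg ds hdvd, PySem.Int.floordiv_eq_ediv_of_pos hg]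
  ring

-- ===== VERDICT (by name: the statement is the Claim_ definition above) =====
theorem solution_spec : Claim_equal_solution := by
  intro tree _ pre
  unfold Spec_solution
  simp only [solution, solution_alt]
  by_cases hlen : tree.length ≤ 1
  · have hn : (tree.length : Int) < 2 := by exact_mod_cast by omega
    rw [PySem.List.pyRange_one_eq_nil (by omega)]
    simp [hn]
  · rw [not_le] at hlen
    obtain ⟨a, t, rfl⟩ : ∃ a t, tree = a :: t := by
      cases tree with
      | nil => simp at hlen
      | cons a t => exact ⟨a, t, rfl⟩
    have hne : (a :: t) ≠ [] := by simp
    have hn2 : ¬ (((a :: t).length : Int) < 2) := by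
      simp only [not_lt]; exact_mod_cast hlen
    rw [if_neg hn2]
    rw [distances_eq]
    -- B's fold over elements is the fold over the mapped offsets
    have hBfold : (a :: t).foldl
        (fun g x => Int.gcd (g : Int) (x - PySem.List.pyGetD (a :: t) 0 0)) 0
        = (dsOf (a :: t)).foldl gcdStep 0 := by
      rw [PySem.List.pyGetD_zero_cons, ← anchor_gcd_eq a t, ← List.foldl_map]
      rfl
    have hshape : (fun (x : Nat) (d : Int) => Int.gcd (x : Int) d) = gcdStep := rfl
    rw [hshape, hBfold]
    have hgne : (dsOf (a :: t)).foldl gcdStep 0 ≠ 0 := by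
      intro h0
      have hall : ∀ d ∈ dsOf (a :: t), d = 0 := ((gcd_fold_eq_zero _ _).mp h0).2
      have hconst := all_eq_head_of_gaps_zero a t hall
      rcases pre with h | ⟨x, hx, hxne⟩
      · have hh : t.length + 1 ≤ 1 := by simpa using h
        omega
      · exact hxne (by simpa using hconst x hx)
    have hgpos : (0 : Int) < (((dsOf (a :: t)).foldl gcdStep 0 : Nat) : Int) := by
      exact_mod_cast Nat.pos_of_ne_zero hgne
    rw [sum_exact_div _ _ hgpos (fun d hd => gcd_fold_dvd _ 0 d hd)]
    rw [PySem.List.pyGetD_neg_one (a :: t) 0 hne, PySem.List.pyGetD_zero_cons, sum_dsOf a t]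
    have hlength : (((dsOf (a :: t)).length : Nat) : Int) = (((a :: t).length : Nat) : Int) - 1 := by
      simp [length_dsOf]
    rw [hlength]
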